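-- pv_equiv track=rewrite | github.com/pypi-data/pypi-mirror-205 | packages/SPTranslator/SPTranslator-0.0.2.tar.gz/SPTranslator-0.0.2/sptranslator/translator.py | group_chunks
-- ===== SOURCE A (Python) =====
-- from typing import List
--
-- def group_chunks(chunks: List[str], ntokens: List[int], max_len: int = 400) -> List[str]:
--     if len(chunks) != len(ntokens):
--         raise ValueError("The lengths of chunks and ntokens should be equal.")
--
--     batches = []
--     cur_batch = ""
--     cur_tokens = 0
--
--     for chunk, ntoken in zip(chunks, ntokens):
--         if cur_tokens + ntoken > max_len: # Limit the number of words to within block_size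
--             batches.append(cur_batch)
--             cur_batch = ""
--             cur_tokens = 0
--         cur_batch += "\n\n" + chunk
--         cur_tokens += ntoken + 2  # +2 for the newlines between chunks
--
--     if cur_batch:  # Add the last cur_batch if it is not empty
--         batches.append(cur_batch)
--
--     batches = [s[2:] for s in batches]
--     return batches
-- ===== SOURCE B (Python) =====
-- from typing import List
--
-- def group_chunks(chunks: List[str], ntokens: List[int], max_len: int = 400) -> List[str]:
--     if not chunks:
--         return []
--     # Pass 1: compute the start index of each batch (cut positions).
--     cuts = [0]
--     cur_tokens = 0
--     for i, ntoken in enumerate(ntokens):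
--         if cur_tokens + ntoken > max_len:
--             cuts.append(i)
--             cur_tokens = 0
--         cur_tokens += ntoken + 2
--     # Pass 2: join the chunk slices between consecutive cuts.
--     bounds = list(zip(cuts, cuts[1:] + [len(chunks)]))
--     return ["\n\n".join(chunks[a:b]) for a, b in bounds]
-- ===== Notes on version B (the rewrite author's own statement) =====
-- stated objective: alternative
-- what changed: Replaces A's single pass that grows each batch string incrementally (prefixing '\n\n' per chunk and stripping it afterwards) by a two-phase algorithm: first compute the cut positions from the token counts alone, then build each batch with one '\n\n'.join over a slice of chunks between consecutive cuts.
-- outside the precondition, e.g. on group_chunks(['a'], [], 400): A raises ValueError, B returns ['a']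
import Mathlib
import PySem

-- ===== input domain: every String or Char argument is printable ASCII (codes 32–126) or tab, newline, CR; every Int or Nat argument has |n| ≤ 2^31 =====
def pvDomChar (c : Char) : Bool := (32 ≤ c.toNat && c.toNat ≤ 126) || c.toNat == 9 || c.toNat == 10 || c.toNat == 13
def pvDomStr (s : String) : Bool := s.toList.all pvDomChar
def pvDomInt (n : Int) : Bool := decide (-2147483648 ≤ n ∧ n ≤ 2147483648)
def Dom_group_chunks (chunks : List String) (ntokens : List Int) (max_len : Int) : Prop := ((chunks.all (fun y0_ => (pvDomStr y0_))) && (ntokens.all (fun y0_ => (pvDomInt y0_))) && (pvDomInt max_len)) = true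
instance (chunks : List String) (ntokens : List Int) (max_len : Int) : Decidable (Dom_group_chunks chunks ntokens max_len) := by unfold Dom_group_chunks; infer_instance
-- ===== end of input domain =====

-- B replaces A's incremental "\n\n"-prefixed batch-string building (stripped by s[2:] at the end)
-- by a two-phase algorithm: compute cut positions from token counts, then join chunk slices (alternative decomposition, same cost).
-- Return-value equivalence only; neither program mutates its arguments.


-- ===== PORT A =====
-- the for-loop over zip(chunks, ntokens) with state (batches, cur_batch, cur_tokens);
-- the Python str cur_batch is carried as its character list (PySem's Chars layer), String.ofList at the very end
def groupChunksLoopA (max_len : Int) : List (String × Int) → List (List Char) → List Char → Int → List (List Char)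
  | [], batches, cur_batch, _ =>
      if cur_batch ≠ [] then batches ++ [cur_batch] else batches
  | (chunk, ntoken) :: rest, batches, cur_batch, cur_tokens =>
      if cur_tokens + ntoken > max_len then
        groupChunksLoopA max_len rest (batches ++ [cur_batch]) ([] ++ '\n' :: '\n' :: chunk.toList) (0 + ntoken + 2)
      else
        groupChunksLoopA max_len rest batches (cur_batch ++ '\n' :: '\n' :: chunk.toList) (cur_tokens + ntoken + 2)

def group_chunks (chunks : List String) (ntokens : List Int) (max_len : Int) : List String :=
  (groupChunksLoopA max_len (chunks.zip ntokens) [] [] 0).map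
    (fun s => String.ofList (PySem.List.slice s (some 2) none))   -- s[2:]

-- ===== PORT B =====
-- pass 1 of Source B: the fold over enumerate(ntokens) collecting cut positions
def groupChunksCutsB (max_len : Int) (ntokens : List Int) : List Int × Int :=
  (PySem.List.enumerate ntokens 0).foldl
    (fun (s : List Int × Int) p =>
      if s.2 + p.2 > max_len then (s.1 ++ [p.1], 0 + p.2 + 2)
      else (s.1, s.2 + p.2 + 2))
    ([0], 0)

def group_chunks_alt (chunks : List String) (ntokens : List Int) (max_len : Int) : List String :=
  if chunks = [] then []
  else
    let cuts := (groupChunksCutsB max_len ntokens).1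
    let bounds := cuts.zip (PySem.List.slice cuts (some 1) none ++ [(chunks.length : Int)])
    bounds.map (fun p => PySem.Str.join "\n\n" (PySem.List.slice chunks (some p.1) (some p.2)))

-- ===== PRECONDITION & SPEC =====
-- A raises ValueError when len(chunks) != len(ntokens); Pre_ admits exactly the equal-length inputs.
def Pre_group_chunks (chunks : List String) (ntokens : List Int) (max_len : Int) : Prop :=
  chunks.length = ntokens.length
instance (chunks : List String) (ntokens : List Int) (max_len : Int) : Decidable (Pre_group_chunks chunks ntokens max_len) := by unfold Pre_group_chunks; infer_instance
def pvWitness_group_chunks : List String × List Int × Int := (["a", "bb", "c"], [3, 2, 1], 5)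

def Spec_group_chunks (chunks : List String) (ntokens : List Int) (max_len : Int) (out : List String) : Prop := out = group_chunks_alt chunks ntokens max_len
instance (chunks : List String) (ntokens : List Int) (max_len : Int) (out : List String) : Decidable (Spec_group_chunks chunks ntokens max_len out) := by unfold Spec_group_chunks; infer_instance

-- ===== CLAIM (what is proved, stated in full; the proofs are below) =====
def Claim_equal_group_chunks : Prop := ∀ (chunks : List String) (ntokens : List Int) (max_len : Int), Dom_group_chunks chunks ntokens max_len → Pre_group_chunks chunks ntokens max_len → Spec_group_chunks chunks ntokens max_len (group_chunks chunks ntokens max_len)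

-- ===== LEMMAS AND PROOFS =====

-- reference recursion: the groups as lists of chunks
def Groups (max_len : Int) : List (String × Int) → List String → Int → List (List String)
  | [], cur, _ => if cur ≠ [] then [cur] else []
  | (c, t) :: rest, cur, tok =>
      if tok + t > max_len then cur :: Groups max_len rest [c] (t + 2)
      else Groups max_len rest (cur ++ [c]) (tok + t + 2)

-- reference recursion for B's pass 1: cuts produced from index i onward, and the final token count
def CutsTok (max_len : Int) : Int → List Int → Int → List Int × Int
  | _, [], tok => ([], tok)
  | i, t :: l, tok =>
      if tok + t > max_len then
        let r := CutsTok max_len (i + 1) l (t + 2)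
        (i :: r.1, r.2)
      else CutsTok max_len (i + 1) l (tok + t + 2)

-- A's incremental cur_batch is the chunks of the current group each prefixed by "\n\n"
def JoinNN (g : List String) : List Char := g.flatMap (fun c => '\n' :: '\n' :: c.toList)

theorem joinNN_eq_nil_iff (g : List String) : JoinNN g = [] ↔ g = [] := by
  cases g <;> simp [JoinNN]

theorem joinNN_append_singleton (g : List String) (c : String) :
    JoinNN (g ++ [c]) = JoinNN g ++ '\n' :: '\n' :: c.toList := by
  simp [JoinNN]

theorem charsJoin_cons (c : String) (l : List String) :
    PySem.Chars.join "\n\n".toList ((c :: l).map String.toList) = c.toList ++ JoinNN l := by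
  induction l generalizing c with
  | nil => simp [JoinNN, PySem.Chars.join_singleton]
  | cons d l ih =>
      rw [List.map_cons, List.map_cons, PySem.Chars.join_cons_cons, ← List.map_cons, ih d]
      simp [JoinNN]

theorem drop_two_joinNN_eq_join (g : List String) :
    String.ofList ((JoinNN g).drop 2) = PySem.Str.join "\n\n" g := by
  cases g with
  | nil => simp [JoinNN, PySem.Str.join, PySem.Chars.join_nil]
  | cons c l =>
      have h : PySem.Str.join "\n\n" (c :: l)
          = String.ofList (PySem.Chars.join "\n\n".toList ((c :: l).map String.toList)) := by
        simp [PySem.Str.join]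
      rw [h, charsJoin_cons]
      simp [JoinNN]

-- A's loop computes the mapped image of the reference recursion
theorem loopA_eq_groups (max_len : Int) (pairs : List (String × Int))
    (batches : List (List Char)) (cur : List String) (tok : Int) :
    groupChunksLoopA max_len pairs batches (JoinNN cur) tok
      = batches ++ (Groups max_len pairs cur tok).map JoinNN := by
  induction pairs generalizing batches cur tok with
  | nil =>
      by_cases h : cur = [] <;>
        simp [groupChunksLoopA, Groups, h, joinNN_eq_nil_iff]
  | cons p rest ih =>
      obtain ⟨c, t⟩ := p
      by_cases h : tok + t > max_len
      · have h1 : JoinNN [c] = [] ++ '\n' :: '\n' :: c.toList := by simp [JoinNN]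
        simp only [groupChunksLoopA, Groups, if_pos h]
        rw [← h1, show (0 : Int) + t + 2 = t + 2 by ring, ih]
        simp
      · simp only [groupChunksLoopA, Groups, if_neg h]
        rw [← joinNN_append_singleton, ih]

-- B's fold computes the reference cuts recursion
theorem foldB_eq_cutsTok (max_len : Int) (l : List Int) (i : Int) (cuts : List Int) (tok : Int) :
    (PySem.List.enumerate l i).foldl
        (fun (s : List Int × Int) p =>
          if s.2 + p.2 > max_len then (s.1 ++ [p.1], 0 + p.2 + 2)
          else (s.1, s.2 + p.2 + 2))
        (cuts, tok)
      = (cuts ++ (CutsTok max_len i l tok).1, (CutsTok max_len i l tok).2) := by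
  induction l generalizing i cuts tok with
  | nil => simp [PySem.List.enumerate_nil, CutsTok]
  | cons t l ih =>
      rw [PySem.List.enumerate_cons, List.foldl_cons]
      by_cases h : tok + t > max_len
      · simp only [if_pos h, CutsTok]
        rw [show (0:Int) + t + 2 = t + 2 from by ring, ih]
        simp
      · simp only [if_neg h, CutsTok]
        exact ih (i + 1) cuts (tok + t + 2)

-- the groups of the reference recursion are the joins of the slices between consecutive cuts
theorem groups_eq_cut_slices (chunks : List String) (ntokens : List Int) (max_len : Int)
    (hlen : chunks.length = ntokens.length) (hn : chunks ≠ []) :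
    ∀ (l : List Int) (i start : Nat), l = ntokens.drop i → i ≤ ntokens.length → start ≤ i →
      (start < i ∨ i = 0) →
    ∀ tok : Int,
      (Groups max_len ((chunks.drop i).zip l) ((chunks.drop start).take (i - start)) tok).map
          (fun g => PySem.Str.join "\n\n" g)
        = (((start : Int) :: (CutsTok max_len (i : Int) l tok).1).zip
              ((CutsTok max_len (i : Int) l tok).1 ++ [(chunks.length : Int)])).map
            (fun p => PySem.Str.join "\n\n" (PySem.List.slice chunks (some p.1) (some p.2))) := by
  intro l
  induction l with
  | nil =>
      intro i start hdrop hi hsi hlt tok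
      have hin : i = ntokens.length := by
        have := congrArg List.length hdrop
        simp at this; omega
      have hstart : start < i := by
        rcases hlt with h | h
        · exact h
        · exfalso; apply hn
          have h0 : chunks.length = 0 := by omega
          exact List.length_eq_zero_iff.mp h0
      have hne : (chunks.drop start).take (i - start) ≠ [] := by
        intro hemp
        have hl := congrArg List.length hemp
        simp at hl
        omega
      have h3 : chunks.drop i = [] := List.drop_eq_nil_iff.mpr (by omega)
      simp only [h3, CutsTok, Groups, List.nil_append, List.zip_cons_cons, List.zip_nil_right, List.map_cons, List.map_nil, ne_eq, hne, not_false_iff, ite_true]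
      rw [PySem.List.slice_natCast]
      have h2 : chunks.length - start = i - start := by omega
      rw [h2]
  | cons t l ih =>
      intro i start hdrop hi hsi hlt tok
      have hilt : i < ntokens.length := by
        by_contra hcon
        have hnil : ntokens.drop i = [] := List.drop_eq_nil_iff.mpr (by omega)
        rw [hnil] at hdrop
        exact List.cons_ne_nil t l hdrop
      have hic : i < chunks.length := by omega
      have hdc : chunks.drop i = chunks[i] :: chunks.drop (i + 1) := List.drop_eq_getElem_cons hic
      have hdl : l = ntokens.drop (i + 1) := by
        have hd := List.drop_eq_getElem_cons hilt
        rw [hd] at hdrop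
        exact (List.cons_eq_cons.mp hdrop.symm).2.symm
      rw [hdc, List.zip_cons_cons]
      by_cases h : tok + t > max_len
      · -- cut at i: emit the current group, start a new one with chunks[i]
        have hcur : (chunks.drop i).take ((i + 1) - i) = [chunks[i]] := by
          rw [hdc, show i + 1 - i = 1 by omega]
          rfl
        have hrec := ih (i + 1) i hdl (by omega) (by omega) (by omega) (t + 2)
        rw [hcur] at hrec
        simp only [Groups, if_pos h, List.map_cons]
        rw [hrec]
        simp only [CutsTok, if_pos h]
        push_cast
        simp only [List.zip_cons_cons, List.map_cons, List.cons_append]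
        congr 2
        rw [PySem.List.slice_natCast]
      · -- no cut: chunks[i] joins the current group
        have hcur : (chunks.drop start).take (i - start) ++ [chunks[i]]
            = (chunks.drop start).take ((i + 1) - start) := by
          rw [show (i + 1) - start = (i - start) + 1 by omega, List.take_add_one]
          congr 1
          rw [List.getElem?_drop, show start + (i - start) = i by omega,
            List.getElem?_eq_getElem hic]
          rfl
        have hrec := ih (i + 1) start hdl (by omega) (by omega) (by omega) (tok + t + 2)
        simp only [Groups, if_neg h]
        rw [hcur, hrec]
        simp only [CutsTok, if_neg h]
        push_cast
        rfl

-- ===== VERDICT (by name: the statement is the Claim_ definition above) =====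
theorem group_chunks_spec : Claim_equal_group_chunks := by
  intro chunks ntokens max_len _ hpre
  unfold Spec_group_chunks group_chunks group_chunks_alt
  by_cases hc : chunks = []
  · have hnt : ntokens = [] := by
      unfold Pre_group_chunks at hpre
      rw [hc] at hpre
      exact List.length_eq_zero_iff.mp hpre.symm
    subst hc; subst hnt
    simp [groupChunksLoopA]
  · rw [if_neg hc]
    have hA : groupChunksLoopA max_len (chunks.zip ntokens) [] [] 0
        = (Groups max_len (chunks.zip ntokens) [] 0).map JoinNN := by
      have h0 := loopA_eq_groups max_len (chunks.zip ntokens) [] [] 0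
      simpa [JoinNN] using h0
    rw [hA, List.map_map]
    have hmap : ∀ g : List String,
        String.ofList (PySem.List.slice (JoinNN g) (some 2) none) = PySem.Str.join "\n\n" g := by
      intro g
      rw [PySem.List.slice_from (JoinNN g) (by omega : (0:Int) ≤ 2)]
      exact drop_two_joinNN_eq_join g
    have hmain := groups_eq_cut_slices chunks ntokens max_len hpre hc ntokens 0 0 (by simp)
      (by omega) (by omega) (Or.inr rfl) 0
    simp only [List.drop_zero, Nat.sub_self, List.take_zero, Nat.cast_zero] at hmain
    have hcuts : (groupChunksCutsB max_len ntokens).1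
        = 0 :: (CutsTok max_len 0 ntokens 0).1 := by
      unfold groupChunksCutsB
      rw [foldB_eq_cutsTok max_len ntokens 0 [0] 0]
      simp
    simp only [hcuts, PySem.List.slice_from_one, List.tail_cons]
    calc ((Groups max_len (chunks.zip ntokens) [] 0).map
            ((fun s => String.ofList (PySem.List.slice s (some 2) none)) ∘ JoinNN))
        = (Groups max_len (chunks.zip ntokens) [] 0).map (fun g => PySem.Str.join "\n\n" g) :=
          List.map_congr_left (fun g _ => hmap g)
      _ = _ := hmain
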